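-- pv_equiv track=rewrite | github.com/CrowbarInc/AI-DM-Ashen-Thrones- | game/world_progression.py | _parse_node_id
-- ===== SOURCE A (Python) =====
-- from typing import Any, Dict, List, Mapping, MutableMapping, Optional, Sequence, Tuple
--
-- _PREFIX_KIND: Tuple[Tuple[str, str], ...] = (
--     ("faction_pressure:", "faction_pressure"),
--     ("faction_agenda:", "faction_agenda"),
--     ("project:", "project"),
--     ("world_clock:", "world_clock"),
--     ("world_flag:", "world_flag"),
-- )
--
-- def _parse_node_id(node_id: str) -> Optional[Tuple[str, str]]:
--     if not isinstance(node_id, str):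
--         return None
--     nid = node_id.strip()
--     if not nid:
--         return None
--     for prefix, kind in _PREFIX_KIND:
--         if nid.startswith(prefix):
--             rest = nid[len(prefix) :]
--             if kind in ("faction_pressure", "faction_agenda", "project", "world_clock", "world_flag"):
--                 if not rest:
--                     return None
--             return kind, rest
--     return None
-- ===== SOURCE B (Python) =====
-- from typing import Optional, Tuple
--
-- _VALID_KINDS = {"faction_pressure", "faction_agenda", "project", "world_clock", "world_flag"}
--
-- def _parse_node_id(node_id: str) -> Optional[Tuple[str, str]]:
--     if not isinstance(node_id, str):
--         return None
--     nid = node_id.strip()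
--     if not nid:
--         return None
--     head, sep, rest = nid.partition(":")
--     if sep and rest and head in _VALID_KINDS:
--         return head, rest
--     return None
-- ===== Notes on version B (the rewrite author's own statement) =====
-- stated objective: idiomatic
-- what changed: Replaces the scan over five candidate prefixes (startswith + slice per candidate) by a single partition at the first colon followed by one set-membership test of the head.
import Mathlib
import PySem

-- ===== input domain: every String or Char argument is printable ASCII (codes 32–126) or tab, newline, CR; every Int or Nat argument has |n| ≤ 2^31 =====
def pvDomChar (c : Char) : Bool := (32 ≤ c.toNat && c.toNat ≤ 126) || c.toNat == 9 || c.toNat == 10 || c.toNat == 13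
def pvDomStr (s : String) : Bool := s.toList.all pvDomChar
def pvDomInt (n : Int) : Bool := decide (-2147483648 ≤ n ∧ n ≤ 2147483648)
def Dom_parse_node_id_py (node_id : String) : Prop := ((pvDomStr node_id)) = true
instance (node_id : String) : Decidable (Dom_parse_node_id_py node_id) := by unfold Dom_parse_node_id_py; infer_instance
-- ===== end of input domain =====

-- B replaces A's scan over five candidate prefixes by one partition at the first colon
-- plus a membership test of the head (idiomatic; identical outputs, proved below).


-- ===== PORT A =====
def pvPrefixKind : List (String × String) :=
  [("faction_pressure:", "faction_pressure"),
   ("faction_agenda:", "faction_agenda"),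
   ("project:", "project"),
   ("world_clock:", "world_clock"),
   ("world_flag:", "world_flag")]

def pvKindTuple : List String :=
  ["faction_pressure", "faction_agenda", "project", "world_clock", "world_flag"]

-- the 'for prefix, kind in _PREFIX_KIND' loop of A, on the stripped characters
def pvALoop : List (String × String) → List Char → Option (String × String)
  | [], _ => none
  | (p, k) :: ps, nid =>
    if PySem.Chars.startswith nid p.toList then
      let rest := PySem.List.slice nid (some (p.toList.length : Int)) none
      if k ∈ pvKindTuple then
        if rest = [] then none else some (k, String.ofList rest)
      else some (k, String.ofList rest)
    else pvALoop ps nid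

def parse_node_id_py (node_id : String) : Option (String × String) :=
  let nid := (PySem.Str.strip node_id).toList
  if nid = [] then none
  else pvALoop pvPrefixKind nid

-- ===== PORT B =====
def pvValidKinds : List String :=
  ["faction_pressure", "faction_agenda", "project", "world_clock", "world_flag"]

def pvNotColon (c : Char) : Bool := c ≠ ':'

-- head, sep, rest = nid.partition(':')  (ported by hand, exact: split at the FIRST colon;
-- 'sep' is nonempty iff a colon occurs, i.e. iff head is shorter than nid)
def parse_node_id_py_alt (node_id : String) : Option (String × String) :=
  let nid := (PySem.Str.strip node_id).toList
  if nid = [] then none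
  else
    let head := nid.takeWhile pvNotColon
    let rest := nid.drop (head.length + 1)
    if head.length < nid.length ∧ rest ≠ [] ∧ String.ofList head ∈ pvValidKinds then
      some (String.ofList head, String.ofList rest)
    else none

-- ===== PRECONDITION & SPEC =====
def Spec_parse_node_id_py (node_id : String) (out : Option (String × String)) : Prop := out = parse_node_id_py_alt node_id
instance (node_id : String) (out : Option (String × String)) : Decidable (Spec_parse_node_id_py node_id out) := by unfold Spec_parse_node_id_py; infer_instance

-- ===== CLAIM (what is proved, stated in full; the proofs are below) =====
def Claim_equal_parse_node_id_py : Prop := ∀ (node_id : String), Dom_parse_node_id_py node_id → Spec_parse_node_id_py node_id (parse_node_id_py node_id)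

-- ===== LEMMAS AND PROOFS =====

-- takeWhile/dropWhile through an explicit colon split
theorem pv_tw_dw (k r : List Char) (hk : ':' ∉ k) :
    (k ++ ':' :: r).takeWhile pvNotColon = k ∧ (k ++ ':' :: r).dropWhile pvNotColon = ':' :: r := by
  induction k with
  | nil => constructor <;> simp [pvNotColon]
  | cons c cs ih =>
    have hc : pvNotColon c = true := by
      simp only [pvNotColon, ne_eq, decide_eq_true_eq]
      exact fun h => hk (by simp [h])
    have ih' := ih (fun h => hk (List.mem_cons_of_mem _ h))
    refine ⟨?_, ?_⟩ <;> simp [hc, ih'.1, ih'.2]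

-- A's startswith test, characterised through B's partition data
theorem pv_startswith_iff (cs k : List Char) (hk : ':' ∉ k) :
    PySem.Chars.startswith cs (k ++ [':']) = true ↔
      cs.takeWhile pvNotColon = k ∧ cs.dropWhile pvNotColon ≠ [] := by
  rw [PySem.Chars.startswith_iff]
  constructor
  · rintro ⟨r, hr⟩
    have hcs : cs = k ++ ':' :: r := by rw [← hr]; simp
    rw [hcs, (pv_tw_dw k r hk).1, (pv_tw_dw k r hk).2]
    simp
  · rintro ⟨htw, hdw⟩
    obtain ⟨c, t, ht⟩ := List.exists_cons_of_ne_nil hdw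
    have hc : pvNotColon c = false := by
      have := List.head_dropWhile_not (p := pvNotColon) (l := cs) (by simp [ht])
      simp_all
    have hc' : c = ':' := by simpa [pvNotColon] using hc
    refine ⟨t, ?_⟩
    have hsplit := List.takeWhile_append_dropWhile (p := pvNotColon) (l := cs)
    rw [← hsplit, htw, ht, hc']
    simp

-- the loop over the five prefixes equals the partition computation
theorem pv_core (cs : List Char) :
    pvALoop pvPrefixKind cs =
      (let head := cs.takeWhile pvNotColon
       let rest := cs.drop (head.length + 1)
       if head.length < cs.length ∧ rest ≠ [] ∧ String.ofList head ∈ pvValidKinds then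
         some (String.ofList head, String.ofList rest)
       else none) := by
  have hsplit := List.takeWhile_append_dropWhile (p := pvNotColon) (l := cs)
  simp only [pvALoop, pvPrefixKind]
  rw [show ("faction_pressure:" : String).toList = "faction_pressure".toList ++ [':'] from by decide,
      show ("faction_agenda:" : String).toList = "faction_agenda".toList ++ [':'] from by decide,
      show ("project:" : String).toList = "project".toList ++ [':'] from by decide,
      show ("world_clock:" : String).toList = "world_clock".toList ++ [':'] from by decide,
      show ("world_flag:" : String).toList = "world_flag".toList ++ [':'] from by decide]
  by_cases hdw : cs.dropWhile pvNotColon = []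
  · -- no colon in cs: every startswith is false, and head = cs
    have hhead : cs.takeWhile pvNotColon = cs := by
      conv_rhs => rw [← hsplit, hdw]
      simp
    have hsw : ∀ k : List Char, ':' ∉ k →
        PySem.Chars.startswith cs (k ++ [':']) = false := by
      intro k hk
      rw [Bool.eq_false_iff]
      exact fun h => ((((pv_startswith_iff cs k hk).mp h).2) hdw).elim
    rw [hsw _ (by decide), hsw _ (by decide), hsw _ (by decide), hsw _ (by decide),
        hsw _ (by decide), hhead]
    simp
  · -- a colon occurs: cs = head ++ ':' :: t
    obtain ⟨c, t, ht⟩ := List.exists_cons_of_ne_nil hdw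
    have hc : pvNotColon c = false := by
      have := List.head_dropWhile_not (p := pvNotColon) (l := cs) (by simp [ht])
      simp_all
    have hc' : c = ':' := by simpa [pvNotColon] using hc
    subst hc'
    set h := cs.takeWhile pvNotColon with hh
    have hcs : cs = h ++ ':' :: t := by
      conv_lhs => rw [← hsplit, ht]
    have hhk : ':' ∉ h := by
      intro hmem
      have := List.mem_takeWhile_imp (hh ▸ hmem)
      simp [pvNotColon] at this
    have hlen : h.length < cs.length := by
      conv_rhs => rw [hcs]
      simp
    have hdrop : cs.drop (h.length + 1) = t := by
      conv_lhs => rw [hcs]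
      rw [show h.length + 1 = (h ++ [':']).length from by simp,
          show h ++ ':' :: t = (h ++ [':']) ++ t from by simp]
      exact List.drop_left
    have hsw : ∀ k : List Char, ':' ∉ k →
        PySem.Chars.startswith cs (k ++ [':']) = decide (h = k) := by
      intro k hk
      by_cases he : h = k
      · simp only [he, decide_true]
        exact (pv_startswith_iff cs k hk).mpr ⟨hh ▸ he, by simp [ht]⟩
      · simp only [he, decide_false, Bool.eq_false_iff]
        exact fun h => he ((pv_startswith_iff cs k hk).mp h).1
    have hslice : ∀ k : List Char, h = k →
        PySem.List.slice cs (some (((k ++ [':']).length : Nat) : Int)) none = t := by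
      intro k hek
      rw [PySem.List.slice_from _ (by positivity)]
      have : ((k ++ [':']).length : Int).toNat = k.length + 1 := by simp
      rw [this, ← hek, hdrop]
    rw [hsw _ (by decide), hsw _ (by decide), hsw _ (by decide), hsw _ (by decide),
        hsw _ (by decide)]
    by_cases h1 : h = "faction_pressure".toList
    · rw [hslice _ h1]
      simp only [h1, pvKindTuple, pvValidKinds]
      simp
      have hdt : List.drop 17 cs = t := by have e := hdrop; rw [h1] at e; simpa using e
      have hlcs : cs.length = 17 + t.length := by rw [hcs, h1]; simp; omega
      rw [hdt]
      rcases t with _ | ⟨a, t0⟩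
      · simp [hlcs]
      · simp only [List.length_cons] at hlcs
        have c1 : 16 < cs.length := by omega
        have c2 : 17 < cs.length := by omega
        simp [c1, c2]
    ·
      by_cases h2 : h = "faction_agenda".toList
      · rw [hslice _ h2]
        simp only [h2, pvKindTuple, pvValidKinds]
        simp
        have hdt : List.drop 15 cs = t := by have e := hdrop; rw [h2] at e; simpa using e
        have hlcs : cs.length = 15 + t.length := by rw [hcs, h2]; simp; omega
        rw [hdt]
        rcases t with _ | ⟨a, t0⟩
        · simp [hlcs]
        · simp only [List.length_cons] at hlcs
          have c1 : 14 < cs.length := by omega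
          have c2 : 15 < cs.length := by omega
          simp [c1, c2]
      ·
        by_cases h3 : h = "project".toList
        · rw [hslice _ h3]
          simp only [h3, pvKindTuple, pvValidKinds]
          simp
          have hdt : List.drop 8 cs = t := by have e := hdrop; rw [h3] at e; simpa using e
          have hlcs : cs.length = 8 + t.length := by rw [hcs, h3]; simp; omega
          rw [hdt]
          rcases t with _ | ⟨a, t0⟩
          · simp [hlcs]
          · simp only [List.length_cons] at hlcs
            have c1 : 7 < cs.length := by omega
            have c2 : 8 < cs.length := by omega
            simp [c1, c2]
        ·
          by_cases h4 : h = "world_clock".toList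
          · rw [hslice _ h4]
            simp only [h4, pvKindTuple, pvValidKinds]
            simp
            have hdt : List.drop 12 cs = t := by have e := hdrop; rw [h4] at e; simpa using e
            have hlcs : cs.length = 12 + t.length := by rw [hcs, h4]; simp; omega
            rw [hdt]
            rcases t with _ | ⟨a, t0⟩
            · simp [hlcs]
            · simp only [List.length_cons] at hlcs
              have c1 : 11 < cs.length := by omega
              have c2 : 12 < cs.length := by omega
              simp [c1, c2]
          ·
            by_cases h5 : h = "world_flag".toList
            · rw [hslice _ h5]
              simp only [h5, pvKindTuple, pvValidKinds]
              simp
              have hdt : List.drop 11 cs = t := by have e := hdrop; rw [h5] at e; simpa using e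
              have hlcs : cs.length = 11 + t.length := by rw [hcs, h5]; simp; omega
              rw [hdt]
              rcases t with _ | ⟨a, t0⟩
              · simp [hlcs]
              · simp only [List.length_cons] at hlcs
                have c1 : 10 < cs.length := by omega
                have c2 : 11 < cs.length := by omega
                simp [c1, c2]
            · simp at h1 h2 h3 h4 h5
              simp [h1, h2, h3, h4, h5, pvValidKinds, String.ofList_eq]

-- ===== VERDICT (by name: the statement is the Claim_ definition above) =====
theorem parse_node_id_py_spec : Claim_equal_parse_node_id_py := by
  intro node_id _
  unfold Spec_parse_node_id_py parse_node_id_py parse_node_id_py_alt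
  by_cases hnil : (PySem.Str.strip node_id).toList = []
  · simp [hnil]
  · simp only [hnil, if_false]
    exact pv_core _
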